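-- pv_equiv track=rewrite | github.com/hanulkimm/- | 프로그래머스/unrated/140108. 문자열 나누기/문자열 나누기.py | solution
-- ===== SOURCE A (Python) =====
-- def solution(s):
--     answer = 0
--     xi = 0
--     while xi < len(s):
--         count_x = 1
--         count_y = 0
--         if xi==len(s)-1:
--             answer += 1
--             break
--         for yi in range(xi+1, len(s)):
--             if s[xi]==s[yi]:
--                 count_x += 1
--             else:
--                 count_y += 1
--             if count_x == count_y:
--                 answer += 1
--                 xi = yi+1
--                 break
--             if yi == len(s)-1:
--                 answer += 1
--                 xi = yi+1
--
--     return answer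
-- ===== SOURCE B (Python) =====
-- def solution(s):
--     answer = 0
--     first = None
--     same = 0
--     diff = 0
--     for c in s:
--         if first is None:
--             first, same, diff = c, 1, 0
--         elif c == first:
--             same += 1
--         else:
--             diff += 1
--         if same == diff:
--             answer += 1
--             first = None
--     if first is not None:
--         answer += 1
--     return answer
-- ===== Notes on version B (the rewrite author's own statement) =====
-- stated objective: simpler
-- what changed: Replaced A's nested while/for with index jumps and break/fall-through bookkeeping by one flat pass over the characters keeping the open segment's first char and two counters, closing the segment when they tie and counting a leftover open segment after the loop.
import Mathlib
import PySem

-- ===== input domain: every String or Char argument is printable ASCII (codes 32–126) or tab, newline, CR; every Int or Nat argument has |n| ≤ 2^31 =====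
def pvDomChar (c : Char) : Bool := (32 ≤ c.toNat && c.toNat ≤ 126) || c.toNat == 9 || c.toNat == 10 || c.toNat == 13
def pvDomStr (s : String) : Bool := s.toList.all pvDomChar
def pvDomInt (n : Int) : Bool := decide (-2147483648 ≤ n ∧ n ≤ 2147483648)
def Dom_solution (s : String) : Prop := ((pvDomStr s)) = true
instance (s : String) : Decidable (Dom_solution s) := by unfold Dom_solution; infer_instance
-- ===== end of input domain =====

-- B replaces A's nested while/for with index jumps by one flat pass over the characters
-- keeping (first char of the open segment, same count, diff count); objective: simpler.

-- ===== PORT A =====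
-- inner for-loop of A: returns (increment added to answer, new xi).
-- `fuel` only bounds the recursion (callers pass enough: the Python loop runs at most
-- s.length - yi steps); indices are always in range on the call path, so `getD _ 'a'`
-- is exact for Python's s[i].
def solInner (s : List Char) (xi : Nat) (fuel : Nat) (yi : Nat) (cx cy : Int) : Int × Nat :=
  match fuel with
  | 0 => (0, xi)
  | fuel + 1 =>
    if yi < s.length then
      let cx' := if s.getD xi 'a' = s.getD yi 'a' then cx + 1 else cx
      let cy' := if s.getD xi 'a' = s.getD yi 'a' then cy else cy + 1
      if cx' = cy' then (1, yi + 1)                 -- answer += 1; xi = yi+1; break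
      else if yi = s.length - 1 then (1, yi + 1)    -- answer += 1; xi = yi+1; (for ends)
      else solInner s xi fuel (yi + 1) cx' cy'
    else (0, xi)                                    -- range exhausted (never hit: callers give enough fuel)

-- outer while-loop of A (fuel likewise: xi strictly grows each iteration, so s.length suffices)
def solOuter (s : List Char) (fuel : Nat) (xi : Nat) (answer : Int) : Int :=
  match fuel with
  | 0 => answer
  | fuel + 1 =>
    if xi < s.length then
      if xi = s.length - 1 then answer + 1
      else
        let r := solInner s xi (s.length - (xi + 1)) (xi + 1) 1 0
        solOuter s fuel r.2 (answer + r.1)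
    else answer

def solution (s : String) : Int := solOuter s.toList s.toList.length 0 0

-- ===== PORT B =====
-- one flat pass: state = (first char of the open segment or none, same, diff, answer)
def solLoopB : List Char → Option Char → Int → Int → Int → Int
  | [], first, _same, _diff, answer =>
      match first with
      | none => answer
      | some _ => answer + 1
  | c :: rest, first, same, diff, answer =>
      let st : Option Char × Int × Int :=
        match first with
        | none => (some c, 1, 0)
        | some f => if c = f then (some f, same + 1, diff) else (some f, same, diff + 1)
      if st.2.1 = st.2.2 then solLoopB rest none st.2.1 st.2.2 (answer + 1)
      else solLoopB rest st.1 st.2.1 st.2.2 answer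

def solution_alt (s : String) : Int := solLoopB s.toList none 0 0 0

-- ===== PRECONDITION & SPEC =====
def Spec_solution (s : String) (out : Int) : Prop := out = solution_alt s
instance (s : String) (out : Int) : Decidable (Spec_solution s out) := by unfold Spec_solution; infer_instance

-- ===== CLAIM (what is proved, stated in full; the proofs are below) =====
def Claim_equal_solution : Prop := ∀ (s : String), Dom_solution s → Spec_solution s (solution s)

-- ===== LEMMAS AND PROOFS =====

-- step lemmas for B's loop
theorem loopB_nil_some (f : Char) (a b ans : Int) : solLoopB [] (some f) a b ans = ans + 1 := rfl

theorem loopB_nil_none (a b ans : Int) : solLoopB [] none a b ans = ans := rfl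

theorem loopB_cons_none (c : Char) (rest : List Char) (a b ans : Int) :
    solLoopB (c :: rest) none a b ans = solLoopB rest (some c) 1 0 ans := by
  simp [solLoopB]

theorem loopB_cons_some_eq (c f : Char) (rest : List Char) (same diff ans : Int) (h : c = f) :
    solLoopB (c :: rest) (some f) same diff ans =
      if same + 1 = diff then solLoopB rest none (same + 1) diff (ans + 1)
      else solLoopB rest (some f) (same + 1) diff ans := by
  simp [solLoopB, h]

theorem loopB_cons_some_ne (c f : Char) (rest : List Char) (same diff ans : Int) (h : ¬ c = f) :
    solLoopB (c :: rest) (some f) same diff ans =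
      if same = diff + 1 then solLoopB rest none same (diff + 1) (ans + 1)
      else solLoopB rest (some f) same (diff + 1) ans := by
  simp [solLoopB, h]

-- with no open segment the stale counters are irrelevant
theorem solLoopB_none (l : List Char) (a b a' b' ans : Int) :
    solLoopB l none a b ans = solLoopB l none a' b' ans := by
  cases l with
  | nil => rfl
  | cons c rest => simp [solLoopB]

theorem drop_eq_cons (s : List Char) (i : Nat) (h : i < s.length) :
    s.drop i = s.getD i 'a' :: s.drop (i + 1) := by
  rw [List.drop_eq_getElem_cons h]
  simp [List.getD, List.getElem?_eq_getElem h]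

-- one step of A's inner loop, written out
theorem solInner_step (s : List Char) (xi : Nat) (fuel yi : Nat) (cx cy : Int)
    (hy : yi < s.length) :
    solInner s xi (fuel + 1) yi cx cy =
      (if (if s.getD xi 'a' = s.getD yi 'a' then cx + 1 else cx)
          = (if s.getD xi 'a' = s.getD yi 'a' then cy else cy + 1) then (1, yi + 1)
       else if yi = s.length - 1 then (1, yi + 1)
       else solInner s xi fuel (yi + 1) (if s.getD xi 'a' = s.getD yi 'a' then cx + 1 else cx)
              (if s.getD xi 'a' = s.getD yi 'a' then cy else cy + 1)) := by
  conv_lhs => rw [solInner]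
  simp only [hy, if_true]

-- the inner loop always moves past yi (given enough fuel)
theorem solInner_snd_gt (s : List Char) (xi : Nat) :
    ∀ fuel yi (cx cy : Int), yi < s.length → s.length - yi ≤ fuel + 1 →
      yi < (solInner s xi (fuel + 1) yi cx cy).2 := by
  intro fuel
  induction fuel with
  | zero =>
    intro yi cx cy hy hf
    have hl : yi = s.length - 1 := by omega
    rw [solInner_step s xi 0 yi cx cy hy]
    split_ifs <;> simp [hl] at *
  | succ n ih =>
    intro yi cx cy hy hf
    rw [solInner_step s xi (n + 1) yi cx cy hy]
    by_cases heq : s.getD xi 'a' = s.getD yi 'a' <;>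
      [rw [if_pos heq, if_pos heq]; rw [if_neg heq, if_neg heq]] <;>
      split_ifs with h1 h2
    · simp
    · simp
    · exact Nat.lt_trans (Nat.lt_succ_self yi) (ih (yi + 1) _ _ (by omega) (by omega))
    · simp
    · simp
    · exact Nat.lt_trans (Nat.lt_succ_self yi) (ih (yi + 1) _ _ (by omega) (by omega))

-- the inner for-loop of A, seen from B's flat loop
theorem solInner_loopB (s : List Char) (xi : Nat) :
    ∀ fuel yi (cx cy ans : Int), yi < s.length → s.length - yi ≤ fuel + 1 → cx ≠ cy →
      solLoopB (s.drop yi) (some (s.getD xi 'a')) cx cy ans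
        = solLoopB (s.drop (solInner s xi (fuel + 1) yi cx cy).2) none 0 0
            (ans + (solInner s xi (fuel + 1) yi cx cy).1) := by
  intro fuel
  induction fuel with
  | zero =>
    intro yi cx cy ans hy hf hne
    have hl : yi = s.length - 1 := by omega
    have hde : s.drop (yi + 1) = [] := List.drop_eq_nil_of_le (by omega)
    rw [drop_eq_cons s yi hy, solInner_step s xi 0 yi cx cy hy]
    by_cases heq : s.getD xi 'a' = s.getD yi 'a'
    · rw [loopB_cons_some_eq _ _ _ _ _ _ heq.symm]
      rw [if_pos heq, if_pos heq]
      by_cases hb : cx + 1 = cy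
      · rw [if_pos hb, if_pos hb, hde]
        rfl
      · rw [if_neg hb, if_neg hb, if_pos hl, hde, loopB_nil_some, loopB_nil_none]
    · rw [loopB_cons_some_ne _ _ _ _ _ _ (fun h => heq h.symm)]
      rw [if_neg heq, if_neg heq]
      by_cases hb : cx = cy + 1
      · rw [if_pos hb, if_pos hb, hde]
        rfl
      · rw [if_neg hb, if_neg hb, if_pos hl, hde, loopB_nil_some, loopB_nil_none]
  | succ n ih =>
    intro yi cx cy ans hy hf hne
    rw [drop_eq_cons s yi hy, solInner_step s xi (n + 1) yi cx cy hy]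
    by_cases heq : s.getD xi 'a' = s.getD yi 'a'
    · rw [loopB_cons_some_eq _ _ _ _ _ _ heq.symm]
      rw [if_pos heq, if_pos heq]
      by_cases hb : cx + 1 = cy
      · rw [if_pos hb, if_pos hb]
        exact solLoopB_none _ _ _ _ _ _
      · rw [if_neg hb, if_neg hb]
        by_cases hl : yi = s.length - 1
        · rw [if_pos hl]
          have hde : s.drop (yi + 1) = [] := List.drop_eq_nil_of_le (by omega)
          rw [hde, loopB_nil_some, loopB_nil_none]
        · rw [if_neg hl]
          exact ih (yi + 1) (cx + 1) cy ans (by omega) (by omega) hb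
    · rw [loopB_cons_some_ne _ _ _ _ _ _ (fun h => heq h.symm)]
      rw [if_neg heq, if_neg heq]
      by_cases hb : cx = cy + 1
      · rw [if_pos hb, if_pos hb]
        exact solLoopB_none _ _ _ _ _ _
      · rw [if_neg hb, if_neg hb]
        by_cases hl : yi = s.length - 1
        · rw [if_pos hl]
          have hde : s.drop (yi + 1) = [] := List.drop_eq_nil_of_le (by omega)
          rw [hde, loopB_nil_some, loopB_nil_none]
        · rw [if_neg hl]
          exact ih (yi + 1) cx (cy + 1) ans (by omega) (by omega) hb

-- the outer while-loop of A equals B's flat loop on the remaining suffix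
theorem solOuter_loopB (s : List Char) :
    ∀ fuel xi (ans : Int), s.length - xi ≤ fuel →
      solOuter s fuel xi ans = solLoopB (s.drop xi) none 0 0 ans := by
  intro fuel
  induction fuel with
  | zero =>
    intro xi ans hf
    have hde : s.drop xi = [] := List.drop_eq_nil_of_le (by omega)
    rw [hde, loopB_nil_none]
    rfl
  | succ n ih =>
    intro xi ans hf
    show (if xi < s.length then _ else _) = _
    by_cases h : xi < s.length
    · rw [if_pos h]
      by_cases hl : xi = s.length - 1
      · rw [if_pos hl]
        have hde : s.drop (xi + 1) = [] := List.drop_eq_nil_of_le (by omega)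
        rw [drop_eq_cons s xi h, loopB_cons_none, hde, loopB_nil_some]
      · rw [if_neg hl]
        have hy : xi + 1 < s.length := by omega
        have hfi : s.length - (xi + 1) = (s.length - (xi + 1) - 1) + 1 := by omega
        have hgt : xi + 1 < (solInner s xi (s.length - (xi + 1)) (xi + 1) 1 0).2 := by
          rw [hfi]
          exact solInner_snd_gt s xi (s.length - (xi + 1) - 1) (xi + 1) 1 0 hy (by omega)
        rw [ih _ _ (by omega)]
        rw [drop_eq_cons s xi h, loopB_cons_none]
        have := solInner_loopB s xi (s.length - (xi + 1) - 1) (xi + 1) 1 0 ans hy (by omega)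
          (by norm_num)
        rw [← hfi] at this
        exact this.symm
    · rw [if_neg h]
      have hde : s.drop xi = [] := List.drop_eq_nil_of_le (by omega)
      rw [hde, loopB_nil_none]

-- ===== VERDICT (by name: the statement is the Claim_ definition above) =====
theorem solution_spec : Claim_equal_solution := by
  intro s _
  unfold Spec_solution solution solution_alt
  exact solOuter_loopB s.toList s.toList.length 0 0 (by omega)
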